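-- pv_equiv track=rewrite | github.com/daniel-reich/turbo-robot | hzs9hZXpgYdGM3iwB_20.py | alternating_caps
-- ===== SOURCE A (Python) =====
-- def alternating_caps(txt):
--   count = 0
--   mystr = ""
--   for i in range (len(txt)):
--     if (count%2==0 and txt[i]!=" "):
--       mystr += txt[i].upper()
--       count += 1
--     elif (count%2!=0 and txt[i]!=" "):
--       mystr += txt[i].lower()
--       count += 1
--     elif (txt[i]== " "):
--       mystr += txt[i]
--   return mystr
-- ===== SOURCE B (Python) =====
-- def alternating_caps(txt):
--   letters = [c for c in txt if c != " "]
--   transformed = [c.upper() if i % 2 == 0 else c.lower() for i, c in enumerate(letters)]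
--   it = iter(transformed)
--   return "".join(c if c == " " else next(it) for c in txt)
-- ===== Notes on version B (the rewrite author's own statement) =====
-- stated objective: alternative
-- what changed: Replaces the fused running-counter loop by three shaped passes: filter out the non-space characters, transform them by enumerate-index parity (even->upper, odd->lower), then reinterleave spaces back from the original text.
import Mathlib
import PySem

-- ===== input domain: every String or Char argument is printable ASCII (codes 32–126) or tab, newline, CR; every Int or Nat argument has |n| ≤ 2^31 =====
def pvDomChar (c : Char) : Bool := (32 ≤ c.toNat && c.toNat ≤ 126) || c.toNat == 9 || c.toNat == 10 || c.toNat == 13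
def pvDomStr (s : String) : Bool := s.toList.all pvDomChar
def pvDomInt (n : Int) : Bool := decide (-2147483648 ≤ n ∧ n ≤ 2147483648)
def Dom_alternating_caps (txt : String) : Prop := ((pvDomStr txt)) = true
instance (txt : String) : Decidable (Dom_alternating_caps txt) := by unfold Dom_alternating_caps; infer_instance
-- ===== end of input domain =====

-- B replaces A's fused running-counter loop by three shaped passes: filter out spaces,
-- transform by enumerate parity, then reinterleave spaces back (alternative decomposition).


-- ===== PORT A =====
-- the loop over range(len(txt)) with running parity counter `count` and accumulator `mystr`
def acLoopA : List Char → Int → List Char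
  | [], _ => []
  | c :: rest, count =>
    if PySem.Int.mod count 2 == 0 && c != ' ' then
      PySem.Chars.upperChar c :: acLoopA rest (count + 1)
    else if PySem.Int.mod count 2 != 0 && c != ' ' then
      PySem.Chars.lowerChar c :: acLoopA rest (count + 1)
    else if c == ' ' then
      c :: acLoopA rest count
    else
      acLoopA rest count

def alternating_caps (txt : String) : String :=
  String.ofList (acLoopA txt.toList 0)

-- ===== PORT B =====
-- reinterleave: spaces stay, other positions pull the next transformed letter
def acWeave : List Char → List Char → List Char
  | [], _ => []
  | c :: rest, ts =>
    if c == ' ' then c :: acWeave rest ts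
    else match ts with
      | t :: ts' => t :: acWeave rest ts'
      | [] => []   -- iterator exhausted: unreachable, letters count matches

def alternating_caps_alt (txt : String) : String :=
  let letters := txt.toList.filter (fun c => c != ' ')
  let transformed := (PySem.List.enumerate letters 0).map
    (fun p => if PySem.Int.mod p.1 2 == 0 then PySem.Chars.upperChar p.2 else PySem.Chars.lowerChar p.2)
  String.ofList (acWeave txt.toList transformed)

-- ===== PRECONDITION & SPEC =====
def Spec_alternating_caps (txt : String) (out : String) : Prop := out = alternating_caps_alt txt
instance (txt : String) (out : String) : Decidable (Spec_alternating_caps txt out) := by unfold Spec_alternating_caps; infer_instance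

-- ===== CLAIM (what is proved, stated in full; the proofs are below) =====
def Claim_equal_alternating_caps : Prop := ∀ (txt : String), Dom_alternating_caps txt → Spec_alternating_caps txt (alternating_caps txt)

-- ===== LEMMAS AND PROOFS =====
-- parity-threaded transform: what B's enumerate-map computes, stated recursively
def acTrans : Int → List Char → List Char
  | _, [] => []
  | k, c :: cs =>
    (if PySem.Int.mod k 2 == 0 then PySem.Chars.upperChar c else PySem.Chars.lowerChar c)
      :: acTrans (k + 1) cs

theorem acTrans_eq_enum_map (cs : List Char) (k : Int) :
    (PySem.List.enumerate cs k).map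
      (fun p => if PySem.Int.mod p.1 2 == 0 then PySem.Chars.upperChar p.2 else PySem.Chars.lowerChar p.2)
      = acTrans k cs := by
  induction cs generalizing k with
  | nil => simp [acTrans, PySem.List.enumerate_nil]
  | cons c rest ih =>
    simp only [PySem.List.enumerate_cons, List.map_cons]
    rw [ih]
    simp [acTrans]

theorem acLoopA_eq_weave (l : List Char) (k : Int) :
    acLoopA l k = acWeave l (acTrans k (l.filter (fun c => c != ' '))) := by
  induction l generalizing k with
  | nil => simp [acLoopA, acWeave]
  | cons c rest ih =>
    by_cases hc : c = ' '
    · subst hc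
      simp [acLoopA, acWeave, List.filter, ih]
    · have hne : (c != ' ') = true := by simp [hc]
      simp [acLoopA, acWeave, List.filter, hne, hc, acTrans, ih]
      split_ifs with h1 h2
      · rfl
      · rfl
      · omega

-- ===== VERDICT (by name: the statement is the Claim_ definition above) =====
theorem alternating_caps_spec : Claim_equal_alternating_caps := by
  intro txt _
  unfold Spec_alternating_caps alternating_caps alternating_caps_alt
  simp only [acTrans_eq_enum_map, acLoopA_eq_weave]
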